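-- pv_equiv track=rewrite | github.com/Daniel-OD/Recovery_HDD | ext4rescue/ext4/super.py | backup_superblock_offsets
-- ===== SOURCE A (Python) =====
-- def _is_sparse_group(group: int) -> bool:
--     """
--     Return ``True`` when *group* should hold a superblock backup under the
--     *sparse_super* feature rule.
--
--     Groups 0 and 1 always hold a copy.  For groups > 1 the rule is: odd
--     numbers that are a perfect power of 3, 5, or 7.
--
--     Reference: ``ext4_group_sparse()`` in ``fs/ext4/super.c``.
--     """
--     if group <= 1:
--         return True
--     if group % 2 == 0:
--         return False
--     for base in (3, 5, 7):
--         n = base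
--         while n < group:
--             n *= base
--         if n == group:
--             return True
--     return False
--
-- def backup_superblock_offsets(
--     block_size: int,
--     blocks_per_group: int,
--     total_groups: int,
-- ) -> list[int]:
--     """
--     Compute byte offsets of candidate backup superblocks on disk.
--
--     For each backup group *g* > 0 the backup superblock is located at the
--     very start of the group's first block::
--
--         offset = g × blocks_per_group × block_size
--
--     (Unlike the primary superblock which is at byte 1024 inside block 0,
--     backup copies in groups 1+ occupy the entire first block of their group.)
--
--     Args:
--         block_size:       Filesystem block size in bytes.
--         blocks_per_group: Number of blocks per group.
--         total_groups:     Total number of block groups in the filesystem.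
--
--     Returns:
--         Sorted list of byte offsets where backup superblocks may exist.
--         Group 0 (primary) is excluded.
--     """
--     offsets: list[int] = []
--     for g in range(1, total_groups):
--         if _is_sparse_group(g):
--             offsets.append(g * blocks_per_group * block_size)
--     return offsets
-- ===== SOURCE B (Python) =====
-- def backup_superblock_offsets(
--     block_size: int,
--     blocks_per_group: int,
--     total_groups: int,
-- ) -> list[int]:
--     # Sparse-super backup groups below total_groups are group 1 plus the
--     # pure powers 3^k, 5^k, 7^k (k >= 1): enumerate them directly instead
--     # of testing every group.
--     groups = set()
--     if 1 < total_groups: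
--         groups.add(1)
--     for base in (3, 5, 7):
--         p = base
--         while p < total_groups:
--             groups.add(p)
--             p *= base
--     return [g * blocks_per_group * block_size for g in sorted(groups)]
-- ===== Notes on version B (the rewrite author's own statement) =====
-- stated objective: faster
-- what changed: Instead of testing every group 1..total_groups-1 with an inner power-climbing loop, B enumerates the sparse groups directly (group 1 plus the powers of 3, 5 and 7 below total_groups) and sorts them.
import Mathlib
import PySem

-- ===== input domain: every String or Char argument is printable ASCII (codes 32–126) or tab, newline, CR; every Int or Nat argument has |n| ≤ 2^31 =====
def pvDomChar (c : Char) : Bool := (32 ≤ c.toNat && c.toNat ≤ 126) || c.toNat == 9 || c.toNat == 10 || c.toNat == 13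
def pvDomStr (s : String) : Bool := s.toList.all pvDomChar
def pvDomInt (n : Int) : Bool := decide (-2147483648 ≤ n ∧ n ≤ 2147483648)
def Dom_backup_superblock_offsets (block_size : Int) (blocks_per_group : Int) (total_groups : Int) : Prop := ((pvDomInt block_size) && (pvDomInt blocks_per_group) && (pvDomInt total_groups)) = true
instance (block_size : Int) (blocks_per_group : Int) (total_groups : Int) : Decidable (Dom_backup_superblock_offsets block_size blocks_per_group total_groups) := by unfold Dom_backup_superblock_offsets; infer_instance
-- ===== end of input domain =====

-- B replaces A's per-group sparse test with direct enumeration of group 1 and the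
-- powers of 3, 5, 7 below total_groups (faster: fewer groups visited).


-- ===== PORT A =====
-- 'n = base; while n < group: n *= base' — the fuel (1st arg) is only a totality
-- guard: the loop runs at most 'group' times since n grows by ≥ 1 each step.
def growA (base : Int) : Nat → Int → Int → Int
  | 0, _, n => n
  | f + 1, g, n => if n < g then growA base f g (n * base) else n

def is_sparse_group (group : Int) : Bool :=
  if group ≤ 1 then true
  else if PySem.Int.mod group 2 == 0 then false
  else [(3 : Int), 5, 7].any (fun base => growA base group.toNat group base == group)

def backup_superblock_offsets (block_size : Int) (blocks_per_group : Int) (total_groups : Int) : List Int :=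
  (PySem.List.pyRange 1 total_groups 1).foldl
    (fun offsets g => if is_sparse_group g then offsets ++ [g * blocks_per_group * block_size] else offsets) []

-- ===== PORT B =====
-- 'p = base; while p < total_groups: groups.add(p); p *= base' — fuel is a totality
-- guard only: the loop runs at most total_groups times.
def powsB (base : Int) : Nat → Int → Int → List Int
  | 0, _, _ => []
  | f + 1, n, p => if p < n then p :: powsB base f n (p * base) else []

def candidatesB (total_groups : Int) : List Int :=
  (if 1 < total_groups then [(1 : Int)] else [])
    ++ powsB 3 total_groups.toNat total_groups 3
    ++ powsB 5 total_groups.toNat total_groups 5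
    ++ powsB 7 total_groups.toNat total_groups 7

def backup_superblock_offsets_alt (block_size : Int) (blocks_per_group : Int) (total_groups : Int) : List Int :=
  (PySem.List.sorted (PySem.Set.ofList (candidatesB total_groups)) (fun g => g)).map
    (fun g => g * blocks_per_group * block_size)

-- ===== PRECONDITION & SPEC =====
def Spec_backup_superblock_offsets (block_size : Int) (blocks_per_group : Int) (total_groups : Int) (out : List Int) : Prop := out = backup_superblock_offsets_alt block_size blocks_per_group total_groups
instance (block_size : Int) (blocks_per_group : Int) (total_groups : Int) (out : List Int) : Decidable (Spec_backup_superblock_offsets block_size blocks_per_group total_groups out) := by unfold Spec_backup_superblock_offsets; infer_instance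

-- ===== CLAIM (what is proved, stated in full; the proofs are below) =====
def Claim_equal_backup_superblock_offsets : Prop := ∀ (block_size : Int) (blocks_per_group : Int) (total_groups : Int), Dom_backup_superblock_offsets block_size blocks_per_group total_groups → Spec_backup_superblock_offsets block_size blocks_per_group total_groups (backup_superblock_offsets block_size blocks_per_group total_groups)

-- ===== LEMMAS AND PROOFS =====

-- A's while loop hits g exactly when g is n·baseᵏ for some k ≥ 0.
lemma growA_eq_iff (base g : Int) (hb : 2 ≤ base) :
    ∀ (f : Nat) (n : Int), 1 ≤ n → g ≤ n + f →
      (growA base f g n = g ↔ ∃ k : Nat, n * base ^ k = g) := by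
  intro f
  induction f with
  | zero =>
      intro n hn hf
      simp only [growA]
      constructor
      · rintro rfl; exact ⟨0, by ring⟩
      · rintro ⟨k, rfl⟩
        have h1 : (1 : Int) ≤ base ^ k := one_le_pow₀ (by omega)
        have h2 : n * 1 ≤ n * base ^ k := by
          exact mul_le_mul_of_nonneg_left h1 (by omega)
        simp only [Nat.cast_zero, add_zero] at hf
        have : n * base ^ k ≤ n := le_trans hf (by omega)
        omega
  | succ f ih =>
      intro n hn hf
      simp only [growA]
      by_cases hlt : n < g
      · simp only [hlt, if_true]
        have hnb : n + 1 ≤ n * base := by nlinarith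
        have := ih (n * base) (by nlinarith) (by push_cast at hf; omega)
        rw [this]
        constructor
        · rintro ⟨k, rfl⟩; exact ⟨k + 1, by ring⟩
        · rintro ⟨k, rfl⟩
          cases k with
          | zero => exact absurd hlt (by simp)
          | succ k => exact ⟨k, by ring⟩
      · simp only [hlt, if_false]
        constructor
        · rintro rfl; exact ⟨0, by ring⟩
        · rintro ⟨k, rfl⟩
          have h1 : (1 : Int) ≤ base ^ k := one_le_pow₀ (by omega)
          have h2 : n * 1 ≤ n * base ^ k := mul_le_mul_of_nonneg_left h1 (by omega)
          omega

-- membership in B's power list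
lemma mem_powsB (base nn x : Int) (hb : 2 ≤ base) :
    ∀ (f : Nat) (p : Int), 1 ≤ p → nn ≤ p + f →
      (x ∈ powsB base f nn p ↔ ∃ k : Nat, x = p * base ^ k ∧ x < nn) := by
  intro f
  induction f with
  | zero =>
      intro p hp hf
      simp only [powsB, List.not_mem_nil, false_iff, not_exists, not_and]
      rintro k rfl
      have h1 : (1 : Int) ≤ base ^ k := one_le_pow₀ (by omega)
      have h2 : p * 1 ≤ p * base ^ k := mul_le_mul_of_nonneg_left h1 (by omega)
      simp only [Nat.cast_zero, add_zero] at hf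
      omega
  | succ f ih =>
      intro p hp hf
      simp only [powsB]
      by_cases hlt : p < nn
      · simp only [hlt, if_true, List.mem_cons]
        have hnb : p + 1 ≤ p * base := by nlinarith
        rw [ih (p * base) (by nlinarith) (by push_cast at hf; omega)]
        constructor
        · rintro (rfl | ⟨k, rfl, hk⟩)
          · exact ⟨0, by ring_nf, hlt⟩
          · exact ⟨k + 1, by ring, hk⟩
        · rintro ⟨k, rfl, hk⟩
          cases k with
          | zero => left; ring
          | succ k => right; exact ⟨k, by ring, hk⟩
      · simp only [hlt, if_false, List.not_mem_nil, false_iff, not_exists, not_and]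
        rintro k rfl
        have h1 : (1 : Int) ≤ base ^ k := one_le_pow₀ (by omega)
        have h2 : p * 1 ≤ p * base ^ k := mul_le_mul_of_nonneg_left h1 (by omega)
        omega

lemma toNat_fuel (nn c : Int) (hc : 0 ≤ c) : nn ≤ c + (nn.toNat : Int) := by omega

-- the sparse test accepts exactly the candidates, inside [1, total_groups)
lemma sparse_iff_mem_candidates (nn g : Int) (h1 : 1 ≤ g) (h2 : g < nn) :
    (is_sparse_group g = true ↔ g ∈ candidatesB nn) := by
  have hnn : 1 < nn := by omega
  have mem_cand : g ∈ candidatesB nn ↔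
      g = 1 ∨ (∃ k : Nat, g = 3 * 3 ^ k) ∨ (∃ k : Nat, g = 5 * 5 ^ k) ∨ (∃ k : Nat, g = 7 * 7 ^ k) := by
    simp only [candidatesB, hnn, if_true, List.mem_append, List.mem_singleton]
    rw [mem_powsB 3 nn g (by omega) nn.toNat 3 (by omega) (toNat_fuel nn 3 (by omega)),
        mem_powsB 5 nn g (by omega) nn.toNat 5 (by omega) (toNat_fuel nn 5 (by omega)),
        mem_powsB 7 nn g (by omega) nn.toNat 7 (by omega) (toNat_fuel nn 7 (by omega))]
    constructor
    · rintro (((h | ⟨k, hk, _⟩) | ⟨k, hk, _⟩) | ⟨k, hk, _⟩)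
      · exact Or.inl h
      · exact Or.inr (Or.inl ⟨k, hk⟩)
      · exact Or.inr (Or.inr (Or.inl ⟨k, hk⟩))
      · exact Or.inr (Or.inr (Or.inr ⟨k, hk⟩))
    · rintro (h | ⟨k, hk⟩ | ⟨k, hk⟩ | ⟨k, hk⟩)
      · exact Or.inl (Or.inl (Or.inl h))
      · exact Or.inl (Or.inl (Or.inr ⟨k, hk, by omega⟩))
      · exact Or.inl (Or.inr ⟨k, hk, by omega⟩)
      · exact Or.inr ⟨k, hk, by omega⟩
  rw [mem_cand]
  by_cases hg1 : g ≤ 1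
  · have : g = 1 := by omega
    subst this
    simp [is_sparse_group]
  · -- g ≥ 2
    have hg2 : 2 ≤ g := by omega
    have hgt : g.toNat = g := by omega
    simp only [is_sparse_group, hg1, if_false]
    by_cases heven : PySem.Int.mod g 2 = 0
    · have hdvd : (2 : Int) ∣ g := (PySem.Int.mod_eq_zero_iff_dvd g 2).mp heven
      simp only [heven, beq_self_eq_true, if_true, Bool.false_eq_true, false_iff]
      rintro (h | ⟨k, hk⟩ | ⟨k, hk⟩ | ⟨k, hk⟩)
      · omega
      · subst hk; rcases hdvd with ⟨m, hm⟩
        rcases (Odd.mul (by decide) (Odd.pow (by decide)) : Odd ((3:Int) * 3 ^ k)) with ⟨j, hj⟩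
        omega
      · subst hk; rcases hdvd with ⟨m, hm⟩
        rcases (Odd.mul (by decide) (Odd.pow (by decide)) : Odd ((5:Int) * 5 ^ k)) with ⟨j, hj⟩
        omega
      · subst hk; rcases hdvd with ⟨m, hm⟩
        rcases (Odd.mul (by decide) (Odd.pow (by decide)) : Odd ((7:Int) * 7 ^ k)) with ⟨j, hj⟩
        omega
    · have hne : (PySem.Int.mod g 2 == 0) = false := by
        simp only [beq_eq_false_iff_ne, ne_eq]; exact heven
      simp only [hne, Bool.false_eq_true, if_false, List.any_cons, List.any_nil,
        Bool.or_eq_true, Bool.false_eq_true, or_false, beq_iff_eq]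
      rw [growA_eq_iff 3 g (by omega) g.toNat 3 (by omega) (by omega),
          growA_eq_iff 5 g (by omega) g.toNat 5 (by omega) (by omega),
          growA_eq_iff 7 g (by omega) g.toNat 7 (by omega) (by omega)]
      constructor
      · rintro (⟨k, hk⟩ | ⟨k, hk⟩ | ⟨k, hk⟩)
        · exact Or.inr (Or.inl ⟨k, hk.symm⟩)
        · exact Or.inr (Or.inr (Or.inl ⟨k, hk.symm⟩))
        · exact Or.inr (Or.inr (Or.inr ⟨k, hk.symm⟩))
      · rintro (h | ⟨k, hk⟩ | ⟨k, hk⟩ | ⟨k, hk⟩)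
        · omega
        · exact Or.inl ⟨k, hk.symm⟩
        · exact Or.inr (Or.inl ⟨k, hk.symm⟩)
        · exact Or.inr (Or.inr ⟨k, hk.symm⟩)

-- the sorted deduplicated candidate set IS A's filtered range
lemma groups_eq (nn : Int) :
    PySem.List.sorted (PySem.Set.ofList (candidatesB nn)) (fun g => g)
      = (PySem.List.pyRange 1 nn 1).filter is_sparse_group := by
  apply PySem.List.sorted_eq_of_perm_of_pairwise_lt
  · rw [List.perm_ext_iff_of_nodup ((PySem.List.nodup_pyRange_one 1 nn).filter _)
      (PySem.Set.nodup_ofList _)]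
    intro a
    rw [List.mem_filter, PySem.Set.mem_ofList, PySem.List.mem_pyRange_one]
    constructor
    · rintro ⟨⟨ha1, ha2⟩, hs⟩
      exact (sparse_iff_mem_candidates nn a ha1 ha2).mp hs
    · intro hmem
      have hb : 1 ≤ a ∧ a < nn := by
        have hmem' := hmem
        simp only [candidatesB, List.mem_append] at hmem'
        rcases hmem' with ((h | h) | h) | h
        · by_cases hnn : 1 < nn
          · simp only [hnn, if_true, List.mem_singleton] at h; omega
          · simp [hnn] at h
        · rcases (mem_powsB 3 nn a (by omega) nn.toNat 3 (by omega)
              (toNat_fuel nn 3 (by omega))).mp h with ⟨k, rfl, hlt⟩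
          have := one_le_pow₀ (a := (3:Int)) (n := k) (by omega)
          constructor <;> nlinarith
        · rcases (mem_powsB 5 nn a (by omega) nn.toNat 5 (by omega)
              (toNat_fuel nn 5 (by omega))).mp h with ⟨k, rfl, hlt⟩
          have := one_le_pow₀ (a := (5:Int)) (n := k) (by omega)
          constructor <;> nlinarith
        · rcases (mem_powsB 7 nn a (by omega) nn.toNat 7 (by omega)
              (toNat_fuel nn 7 (by omega))).mp h with ⟨k, rfl, hlt⟩
          have := one_le_pow₀ (a := (7:Int)) (n := k) (by omega)
          constructor <;> nlinarith
      exact ⟨hb, (sparse_iff_mem_candidates nn a hb.1 hb.2).mpr hmem⟩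
  · exact List.Pairwise.filter _ (PySem.List.pairwise_lt_pyRange_one 1 nn)

-- ===== VERDICT (by name: the statement is the Claim_ definition above) =====
theorem backup_superblock_offsets_spec : Claim_equal_backup_superblock_offsets := by
  intro bs bpg nn _
  show backup_superblock_offsets bs bpg nn = backup_superblock_offsets_alt bs bpg nn
  unfold backup_superblock_offsets backup_superblock_offsets_alt
  rw [PySem.List.foldl_append_if is_sparse_group (fun g => g * bpg * bs), groups_eq]
  simp
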